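-- pv_equiv track=rewrite | github.com/JayAllison/aoc2024 | day09/puzzle2.py | find_suitable_opening
-- ===== SOURCE A (Python) =====
-- def find_suitable_opening(disk, file_pos, file_size) -> int or None:
--     # find a spot to place this file
--     opening_start = 0
--     opening_end = None
--
--     while True:
--         # find the next blank spot
--         while opening_start < len(disk) and disk[opening_start] is not None:
--             opening_start += 1
--
--         # if we got past the location of the current file, stop
--         # or, if we got all the way to the end of the disk, stop
--         if opening_start > file_pos or opening_start >= len(disk):
--             break
--
--         # find the end of this blank spot, which might be the end of the disk
--         opening_end = opening_start
--         while opening_end < len(disk) and disk[opening_end] is None: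
--             opening_end += 1
--
--         # is this spot big enough?
--         if opening_end - opening_start >= file_size:
--             break
--
--         # if not, go to the next one
--         opening_start = opening_end
--
--     # a suitable opening is long enough for the file AND before the file's current location
--     if opening_end and opening_end - opening_start >= file_size and opening_start < file_pos - file_size:
--         return opening_start
--
--     return None
-- ===== SOURCE B (Python) =====
-- def find_suitable_opening(disk, file_pos, file_size) -> int or None:
--     # Two-pass version: first collect every maximal run of None cells as
--     # (start, end) pairs, then scan that gap table once to decide.
--     gaps = []
--     start = None
--     i = 0
--     for cell in disk:
--         if cell is None:
--             if start is None:
--                 start = i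
--         else:
--             if start is not None:
--                 gaps.append((start, i))
--                 start = None
--         i += 1
--     if start is not None:
--         gaps.append((start, len(disk)))
--
--     for (s, e) in gaps:
--         if s > file_pos:
--             return None
--         if e - s >= file_size:
--             return s if s < file_pos - file_size else None
--     return None
-- ===== Notes on version B (the rewrite author's own statement) =====
-- stated objective: alternative
-- what changed: A interleaves gap-finding, gap-sizing and the stopping decision in one stateful while-loop with a stale opening_end; B first builds a table of all maximal None-runs in a single scan and then makes the decision in a separate scan over that table.
import Mathlib
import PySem

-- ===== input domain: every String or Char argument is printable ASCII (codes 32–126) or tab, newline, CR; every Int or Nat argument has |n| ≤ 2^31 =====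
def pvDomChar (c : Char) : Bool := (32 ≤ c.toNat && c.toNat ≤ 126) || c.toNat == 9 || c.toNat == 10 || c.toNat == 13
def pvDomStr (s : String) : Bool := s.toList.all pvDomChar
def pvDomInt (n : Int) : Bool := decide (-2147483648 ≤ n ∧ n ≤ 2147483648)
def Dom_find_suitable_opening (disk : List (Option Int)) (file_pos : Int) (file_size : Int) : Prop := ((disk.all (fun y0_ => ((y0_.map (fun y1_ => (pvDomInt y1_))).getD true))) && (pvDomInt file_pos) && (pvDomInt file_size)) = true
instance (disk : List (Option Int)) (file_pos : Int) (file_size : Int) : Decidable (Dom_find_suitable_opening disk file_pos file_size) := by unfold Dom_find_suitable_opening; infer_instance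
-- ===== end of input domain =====

-- B replaces A's single stateful while-loop (interleaved gap find/size/stop) by a
-- gap-table-building scan followed by a separate decision scan (objective: alternative).

-- ===== PORT A =====
-- inner while: `while opening_start < len(disk) and disk[opening_start] is not None: opening_start += 1`
def pvSkipFull (disk : List (Option Int)) (i : Nat) : Nat :=
  if h : i < disk.length then
    if (disk[i]'h).isSome then pvSkipFull disk (i + 1) else i
  else i
termination_by disk.length - i

-- inner while: `while opening_end < len(disk) and disk[opening_end] is None: opening_end += 1`
def pvSkipBlank (disk : List (Option Int)) (i : Nat) : Nat :=
  if h : i < disk.length then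
    if (disk[i]'h) = none then pvSkipBlank disk (i + 1) else i
  else i
termination_by disk.length - i

-- (termination facts for the outer while-loop; cited by pvFindLoop's decreasing_by)
theorem pvSkipFull_ge (disk : List (Option Int)) (i : Nat) : i ≤ pvSkipFull disk i := by
  induction i using pvSkipFull.induct (disk := disk) with
  | case1 i h hsome ih => rw [pvSkipFull]; simp [h, hsome]; omega
  | case2 i h hsome => rw [pvSkipFull]; simp [h, hsome]
  | case3 i h => rw [pvSkipFull]; simp [h]

theorem pvSkipFull_none (disk : List (Option Int)) (i : Nat) :
    pvSkipFull disk i < disk.length → disk[pvSkipFull disk i]? = some none := by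
  induction i using pvSkipFull.induct (disk := disk) with
  | case1 x h hsome ih => rw [pvSkipFull]; simp only [h, hsome, dif_pos, if_pos]; exact ih
  | case2 x h hsome =>
      have hval : pvSkipFull disk x = x := by rw [pvSkipFull]; simp [h, hsome]
      rw [hval]
      intro hlt
      rw [List.getElem?_eq_getElem h]
      cases hx : disk[x] with
      | none => rfl
      | some v => rw [hx] at hsome; simp at hsome
  | case3 x h =>
      have hval : pvSkipFull disk x = x := by rw [pvSkipFull]; simp [h]
      rw [hval]
      intro hlt
      exact absurd hlt h

theorem pvSkipBlank_ge (disk : List (Option Int)) (i : Nat) : i ≤ pvSkipBlank disk i := by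
  induction i using pvSkipBlank.induct (disk := disk) with
  | case1 i h hnone ih => rw [pvSkipBlank]; simp [h, hnone]; omega
  | case2 i h hnone => rw [pvSkipBlank]; simp [h, hnone]
  | case3 i h => rw [pvSkipBlank]; simp [h]

theorem pvSkipBlank_gt (disk : List (Option Int)) (i : Nat) (h : i < disk.length)
    (hnone : disk[i]? = some none) : i < pvSkipBlank disk i := by
  have hnone' : disk[i] = none := by
    rw [List.getElem?_eq_getElem h] at hnone; exact Option.some.inj hnone
  rw [pvSkipBlank]; simp [h, hnone']
  have := pvSkipBlank_ge disk (i + 1); omega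

-- outer `while True:` loop; returns final (opening_start, opening_end)
def pvFindLoop (disk : List (Option Int)) (file_pos file_size : Int)
    (opening_start : Nat) (opening_end : Option Nat) : Nat × Option Nat :=
  let s := pvSkipFull disk opening_start
  if (s : Int) > file_pos ∨ disk.length ≤ s then (s, opening_end)
  else
    let e := pvSkipBlank disk s
    if (e : Int) - (s : Int) ≥ file_size then (s, some e)
    else pvFindLoop disk file_pos file_size e (some e)
termination_by disk.length - opening_start
decreasing_by
  have h1 : opening_start ≤ pvSkipFull disk opening_start := pvSkipFull_ge disk opening_start
  rename_i hbr _
  have hs : pvSkipFull disk opening_start < disk.length := by omega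
  have h2 := pvSkipBlank_gt disk (pvSkipFull disk opening_start) hs (pvSkipFull_none disk opening_start hs)
  omega

def find_suitable_opening (disk : List (Option Int)) (file_pos : Int) (file_size : Int) : Option Int :=
  let r := pvFindLoop disk file_pos file_size 0 none
  match r.2 with
  | none => none
  | some e =>
      if e ≠ 0 ∧ (e : Int) - (r.1 : Int) ≥ file_size ∧ (r.1 : Int) < file_pos - file_size
      then some (r.1 : Int) else none

-- ===== PORT B =====
-- one step of the gap-collecting for-loop; state = (gaps, start, i)
def pvGapStep (acc : List (Nat × Nat) × Option Nat × Nat) (cell : Option Int) :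
    List (Nat × Nat) × Option Nat × Nat :=
  match cell, acc.2.1 with
  | none, none => (acc.1, some acc.2.2, acc.2.2 + 1)
  | none, some s => (acc.1, some s, acc.2.2 + 1)
  | some _, none => (acc.1, none, acc.2.2 + 1)
  | some _, some s => (acc.1 ++ [(s, acc.2.2)], none, acc.2.2 + 1)

def pvGaps (disk : List (Option Int)) : List (Nat × Nat) :=
  let r := disk.foldl pvGapStep ([], none, 0)
  match r.2.1 with
  | none => r.1
  | some s => r.1 ++ [(s, disk.length)]

-- the decision for-loop over the gap table
def pvDecide (gaps : List (Nat × Nat)) (file_pos file_size : Int) : Option Int :=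
  match gaps with
  | [] => none
  | (s, e) :: rest =>
    if (s : Int) > file_pos then none
    else if (e : Int) - (s : Int) ≥ file_size then
      (if (s : Int) < file_pos - file_size then some (s : Int) else none)
    else pvDecide rest file_pos file_size

def find_suitable_opening_alt (disk : List (Option Int)) (file_pos : Int) (file_size : Int) : Option Int :=
  pvDecide (pvGaps disk) file_pos file_size

-- ===== PRECONDITION & SPEC =====
def Spec_find_suitable_opening (disk : List (Option Int)) (file_pos : Int) (file_size : Int) (out : Option Int) : Prop := out = find_suitable_opening_alt disk file_pos file_size
instance (disk : List (Option Int)) (file_pos : Int) (file_size : Int) (out : Option Int) : Decidable (Spec_find_suitable_opening disk file_pos file_size out) := by unfold Spec_find_suitable_opening; infer_instance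

-- ===== CLAIM (what is proved, stated in full; the proofs are below) =====
def Claim_equal_find_suitable_opening : Prop := ∀ (disk : List (Option Int)) (file_pos : Int) (file_size : Int), Dom_find_suitable_opening disk file_pos file_size → Spec_find_suitable_opening disk file_pos file_size (find_suitable_opening disk file_pos file_size)

-- ===== LEMMAS AND PROOFS =====

theorem pvSkipFull_le (disk : List (Option Int)) (i : Nat) (h : i ≤ disk.length) :
    pvSkipFull disk i ≤ disk.length := by
  induction i using pvSkipFull.induct (disk := disk) with
  | case1 i h' hsome ih => rw [pvSkipFull]; simp [h', hsome]; exact ih h'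
  | case2 i h' hsome => rw [pvSkipFull]; simp [h', hsome]; omega
  | case3 i h' => rw [pvSkipFull]; simp [h']; omega

theorem pvSkipFull_sound (disk : List (Option Int)) (i k : Nat) (hk : k < disk.length) :
    i ≤ k → k < pvSkipFull disk i → (disk[k]).isSome := by
  induction i using pvSkipFull.induct (disk := disk) with
  | case1 i h' hsome ih =>
      intro h1 h2
      rw [pvSkipFull] at h2; simp [h', hsome] at h2
      rcases Nat.eq_or_lt_of_le h1 with heq | hlt
      · subst heq; exact hsome
      · exact ih hlt h2
  | case2 i h' hsome => intro h1 h2; rw [pvSkipFull] at h2; simp [h', hsome] at h2; omega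
  | case3 i h' => intro h1 h2; rw [pvSkipFull] at h2; simp [h'] at h2; omega

theorem pvSkipBlank_le (disk : List (Option Int)) (i : Nat) (h : i ≤ disk.length) :
    pvSkipBlank disk i ≤ disk.length := by
  induction i using pvSkipBlank.induct (disk := disk) with
  | case1 i h' hnone ih => rw [pvSkipBlank]; simp [h', hnone]; exact ih h'
  | case2 i h' hnone => rw [pvSkipBlank]; simp [h', hnone]; omega
  | case3 i h' => rw [pvSkipBlank]; simp [h']; omega

theorem pvSkipBlank_sound (disk : List (Option Int)) (i k : Nat) (hk : k < disk.length) :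
    i ≤ k → k < pvSkipBlank disk i → disk[k] = none := by
  induction i using pvSkipBlank.induct (disk := disk) with
  | case1 i h' hnone ih =>
      intro h1 h2
      rw [pvSkipBlank] at h2; simp [h', hnone] at h2
      rcases Nat.eq_or_lt_of_le h1 with heq | hlt
      · subst heq; exact hnone
      · exact ih hlt h2
  | case2 i h' hnone => intro h1 h2; rw [pvSkipBlank] at h2; simp [h', hnone] at h2; omega
  | case3 i h' => intro h1 h2; rw [pvSkipBlank] at h2; simp [h'] at h2; omega

theorem pvSkipBlank_stop (disk : List (Option Int)) (i : Nat) :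
    pvSkipBlank disk i < disk.length → disk[pvSkipBlank disk i]? ≠ some none := by
  induction i using pvSkipBlank.induct (disk := disk) with
  | case1 x h hnone ih => rw [pvSkipBlank]; simp only [h, hnone, dif_pos, if_pos]; exact ih
  | case2 x h hnone =>
      have hval : pvSkipBlank disk x = x := by rw [pvSkipBlank]; simp [h, hnone]
      rw [hval]
      intro hlt hcon
      rw [List.getElem?_eq_getElem h] at hcon
      exact hnone (Option.some.inj hcon)
  | case3 x h =>
      have hval : pvSkipBlank disk x = x := by rw [pvSkipBlank]; simp [h]
      rw [hval]
      intro hlt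
      exact absurd hlt h

-- reference gap list: one structural scan, (index, current-run-start) as parameters
def gapsRec : List (Option Int) → Nat → Option Nat → List (Nat × Nat)
  | [], _, none => []
  | [], n, some s => [(s, n)]
  | none :: t, n, none => gapsRec t (n + 1) (some n)
  | none :: t, n, some s => gapsRec t (n + 1) (some s)
  | some _ :: t, n, none => gapsRec t (n + 1) none
  | some _ :: t, n, some s => (s, n) :: gapsRec t (n + 1) none

-- B's fold computes gapsRec
theorem pvGapStep_counter (l : List (Option Int)) (g : List (Nat × Nat)) (st : Option Nat) (n : Nat) :
    (l.foldl pvGapStep (g, st, n)).2.2 = n + l.length := by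
  induction l generalizing g st n with
  | nil => simp
  | cons c t ih =>
      cases c with
      | none => cases st <;> simp [pvGapStep, ih] <;> omega
      | some v => cases st <;> simp [pvGapStep, ih] <;> omega

theorem pvGaps_foldl (l : List (Option Int)) (g : List (Nat × Nat)) (st : Option Nat) (n : Nat) :
    (match (l.foldl pvGapStep (g, st, n)).2.1 with
      | none => (l.foldl pvGapStep (g, st, n)).1
      | some s => (l.foldl pvGapStep (g, st, n)).1 ++ [(s, (l.foldl pvGapStep (g, st, n)).2.2)])
    = g ++ gapsRec l n st := by
  induction l generalizing g st n with
  | nil => cases st <;> simp [gapsRec]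
  | cons c t ih =>
      cases c with
      | none =>
          cases st with
          | none => simpa [pvGapStep, gapsRec] using ih g (some n) (n + 1)
          | some s => simpa [pvGapStep, gapsRec] using ih g (some s) (n + 1)
      | some v =>
          cases st with
          | none => simpa [pvGapStep, gapsRec] using ih g none (n + 1)
          | some s =>
              have := ih (g ++ [(s, n)]) none (n + 1)
              simpa [pvGapStep, gapsRec] using this
  
theorem pvGaps_eq (disk : List (Option Int)) : pvGaps disk = gapsRec disk 0 none := by
  have h := pvGaps_foldl disk [] none 0
  have hc := pvGapStep_counter disk [] none 0
  unfold pvGaps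
  simp only [hc] at h
  simpa using h

-- gapsRec skips a run of occupied cells
theorem gapsRec_skip_some (disk : List (Option Int)) :
    ∀ (d i j : Nat), j - i ≤ d → i ≤ j → j ≤ disk.length →
    (∀ k (hk : k < disk.length), i ≤ k → k < j → (disk[k]).isSome) →
    gapsRec (disk.drop i) i none = gapsRec (disk.drop j) j none := by
  intro d
  induction d with
  | zero =>
      intro i j h1 h2 _ _
      obtain rfl : i = j := by omega
      rfl
  | succ d ih =>
      intro i j h1 h2 h3 h4
      rcases Nat.eq_or_lt_of_le h2 with heq | hlt
      · subst heq; rfl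
      · have hi : i < disk.length := by omega
        have hdrop : disk.drop i = disk[i] :: disk.drop (i + 1) := List.drop_eq_getElem_cons hi
        have hsome := h4 i hi (le_refl i) hlt
        rw [hdrop]
        cases hx : disk[i] with
        | none => rw [hx] at hsome; simp at hsome
        | some v =>
            show gapsRec (some v :: disk.drop (i + 1)) i none = _
            rw [gapsRec]
            exact ih (i + 1) j (by omega) (by omega) h3 (fun k hk hk1 hk2 => h4 k hk (by omega) hk2)

-- gapsRec skips a run of blank cells while a gap is open
theorem gapsRec_skip_none (disk : List (Option Int)) (s : Nat) :
    ∀ (d j e : Nat), e - j ≤ d → j ≤ e → e ≤ disk.length →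
    (∀ k (hk : k < disk.length), j ≤ k → k < e → disk[k] = none) →
    gapsRec (disk.drop j) j (some s) = gapsRec (disk.drop e) e (some s) := by
  intro d
  induction d with
  | zero =>
      intro j e h1 h2 _ _
      obtain rfl : j = e := by omega
      rfl
  | succ d ih =>
      intro j e h1 h2 h3 h4
      rcases Nat.eq_or_lt_of_le h2 with heq | hlt
      · subst heq; rfl
      · have hj : j < disk.length := by omega
        have hdrop : disk.drop j = disk[j] :: disk.drop (j + 1) := List.drop_eq_getElem_cons hj
        have hnone := h4 j hj (le_refl j) hlt
        rw [hdrop, hnone]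
        show gapsRec (none :: disk.drop (j + 1)) j (some s) = _
        rw [gapsRec]
        exact ih (j + 1) e (by omega) (by omega) h3 (fun k hk hk1 hk2 => h4 k hk (by omega) hk2)

-- head of the gap list from position i, when the next blank cell is s
theorem gapsRec_head (disk : List (Option Int)) (i s : Nat)
    (his : i ≤ s) (hs : s < disk.length) (hnone : disk[s]? = some none)
    (hfull : ∀ k (hk : k < disk.length), i ≤ k → k < s → (disk[k]).isSome) :
    gapsRec (disk.drop i) i none
      = (s, pvSkipBlank disk s) :: gapsRec (disk.drop (pvSkipBlank disk s)) (pvSkipBlank disk s) none := by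
  set e := pvSkipBlank disk s with he
  have hse : s < e := pvSkipBlank_gt disk s hs hnone
  have hel : e ≤ disk.length := pvSkipBlank_le disk s (by omega)
  have hnone' : disk[s] = none := by
    rw [List.getElem?_eq_getElem hs] at hnone; exact Option.some.inj hnone
  have h1 : gapsRec (disk.drop i) i none = gapsRec (disk.drop s) s none :=
    gapsRec_skip_some disk (s - i) i s (by omega) his (by omega) hfull
  have hdrop : disk.drop s = disk[s] :: disk.drop (s + 1) := List.drop_eq_getElem_cons hs
  rw [h1, hdrop, hnone']
  show gapsRec (none :: disk.drop (s + 1)) s none = _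
  rw [gapsRec]
  have h2 : gapsRec (disk.drop (s + 1)) (s + 1) (some s) = gapsRec (disk.drop e) e (some s) :=
    gapsRec_skip_none disk s (e - (s + 1)) (s + 1) e (by omega) (by omega) hel
      (fun k hk hk1 hk2 => pvSkipBlank_sound disk s k hk (by omega) hk2)
  rw [h2]
  rcases Nat.eq_or_lt_of_le hel with heq | hlt
  · rw [heq]; simp [gapsRec]
  · have hsome := pvSkipBlank_stop disk s (by omega)
    have hdrope : disk.drop e = disk[e] :: disk.drop (e + 1) := List.drop_eq_getElem_cons hlt
    rw [hdrope]
    cases hx : disk[e] with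
    | none =>
        exact absurd (by rw [List.getElem?_eq_getElem hlt, hx] : disk[pvSkipBlank disk s]? = some none) hsome
    | some v =>
        show gapsRec (some v :: disk.drop (e + 1)) e (some s)
          = (s, e) :: gapsRec (some v :: disk.drop (e + 1)) e none
        rw [gapsRec, gapsRec]

-- the final truthiness-guarded return of A, as a function of the loop result
def pvAFinish (file_pos file_size : Int) (r : Nat × Option Nat) : Option Int :=
  match r.2 with
  | none => none
  | some e =>
      if e ≠ 0 ∧ (e : Int) - (r.1 : Int) ≥ file_size ∧ (r.1 : Int) < file_pos - file_size
      then some (r.1 : Int) else none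

-- main loop invariant: A's loop from position i decides exactly pvDecide on the gaps from i
theorem pvFindLoop_eq (disk : List (Option Int)) (file_pos file_size : Int) :
    ∀ (m i : Nat) (prev : Option Nat), disk.length - i ≤ m → i ≤ disk.length →
    (∀ e', prev = some e' → e' ≤ i ∧ 0 < file_size) →
    pvAFinish file_pos file_size (pvFindLoop disk file_pos file_size i prev)
      = pvDecide (gapsRec (disk.drop i) i none) file_pos file_size := by
  intro m
  induction m with
  | zero =>
      intro i prev h1 h2 hinv
      have hi : i = disk.length := by omega
      subst hi
      rw [pvFindLoop]
      have hsf : pvSkipFull disk disk.length = disk.length := by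
        rw [pvSkipFull]; simp
      rw [hsf]
      simp only [le_refl, or_true, if_true]
      have : gapsRec (disk.drop disk.length) disk.length none = [] := by simp [gapsRec]
      rw [this]
      cases prev with
      | none => rfl
      | some e' =>
          obtain ⟨he1, he2⟩ := hinv e' rfl
          simp only [pvAFinish, pvDecide]
          rw [if_neg]; rintro ⟨-, hc2, -⟩; omega
  | succ m ih =>
      intro i prev h1 h2 hinv
      rw [pvFindLoop]
      set s := pvSkipFull disk i with hsdef
      have his : i ≤ s := pvSkipFull_ge disk i
      have hsl : s ≤ disk.length := pvSkipFull_le disk i h2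
      by_cases hbr : (s : Int) > file_pos ∨ disk.length ≤ s
      · rw [if_pos hbr]
        have hLHS : pvAFinish file_pos file_size (s, prev) = none := by
          cases prev with
          | none => rfl
          | some e' =>
              obtain ⟨he1, he2⟩ := hinv e' rfl
              simp only [pvAFinish]
              rw [if_neg]; rintro ⟨-, hc2, -⟩
              have : (e' : Int) ≤ (s : Int) := by exact_mod_cast le_trans he1 his
              omega
        rw [hLHS]
        rcases Nat.lt_or_ge s disk.length with hlt | hge
        · -- s is a blank cell with s > file_pos: first gap starts past file_pos
          have hnone := pvSkipFull_none disk i hlt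
          rw [gapsRec_head disk i s his hlt hnone
            (fun k hk hk1 hk2 => pvSkipFull_sound disk i k hk hk1 hk2)]
          have hgt : (s : Int) > file_pos := by
            rcases hbr with h | h
            · exact h
            · omega
          simp [pvDecide, hgt]
        · -- ran off the end: no gap from i at all
          have hskip : gapsRec (disk.drop i) i none = gapsRec (disk.drop disk.length) disk.length none :=
            gapsRec_skip_some disk (disk.length - i) i disk.length (by omega) h2 (le_refl _)
              (fun k hk hk1 hk2 => pvSkipFull_sound disk i k hk hk1 (by omega))
          rw [hskip]; simp [gapsRec, pvDecide]
      · rw [if_neg hbr]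
        have hle : (s : Int) ≤ file_pos := by omega
        have hlt' : s < disk.length := by omega
        have hnone := pvSkipFull_none disk i hlt'
        set e := pvSkipBlank disk s with hedef
        have hse : s < e := pvSkipBlank_gt disk s hlt' hnone
        have hel : e ≤ disk.length := pvSkipBlank_le disk s (by omega)
        rw [gapsRec_head disk i s his hlt' hnone
          (fun k hk hk1 hk2 => pvSkipFull_sound disk i k hk hk1 hk2), ← hedef]
        have hns : ¬ ((s : Int) > file_pos) := by omega
        by_cases hbig : (e : Int) - (s : Int) ≥ file_size
        · rw [if_pos hbig]
          have hne : e ≠ 0 := by omega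
          simp only [pvAFinish, pvDecide]
          rw [if_neg hns, if_pos hbig]
          by_cases hfin : (s : Int) < file_pos - file_size
          · rw [if_pos ⟨hne, hbig, hfin⟩, if_pos hfin]
          · rw [if_neg (by rintro ⟨-, -, hc⟩; exact hfin hc), if_neg hfin]
        · rw [if_neg hbig]
          have hfs : 0 < file_size := by
            have : (s : Int) + 1 ≤ (e : Int) := by exact_mod_cast hse
            omega
          rw [ih e (some e) (by omega) hel (fun e' he' => by cases he'; exact ⟨le_refl e, hfs⟩)]
          simp only [pvDecide]
          rw [if_neg hns, if_neg hbig]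

-- ===== VERDICT (by name: the statement is the Claim_ definition above) =====
theorem find_suitable_opening_spec : Claim_equal_find_suitable_opening := by
  intro disk file_pos file_size _
  unfold Spec_find_suitable_opening find_suitable_opening find_suitable_opening_alt
  rw [pvGaps_eq]
  have h := pvFindLoop_eq disk file_pos file_size disk.length 0 none (by omega) (by omega)
    (fun e' he' => by cases he')
  simp only [List.drop_zero] at h
  exact h
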